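-- pv_equiv track=rewrite | github.com/byarmis/AdventOfCode | AoC2019/Day_4/Day_4.py | doubles_part_of_larger
-- ===== SOURCE A (Python) =====
-- def doubles_part_of_larger(num):
--     num = str(num)
--     min_length = float('inf')
--     loc = 0
--
--     while loc < len(num):
--         val = num[loc]
--         # Go along until the dupes end
--         t_loc = loc
--         while  t_loc < len(num) and num[t_loc] == val:
--             t_loc += 1
--         length = t_loc - loc
--         loc = t_loc
--         if length >= 2:
--             min_length = min((length, min_length))
--
--     return min_length != 2
-- ===== SOURCE B (Python) =====
-- def doubles_part_of_larger(num):
--     s = str(num)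
--     return not any(
--         s[i] == s[i + 1]
--         and (i == 0 or s[i - 1] != s[i])
--         and (i + 2 == len(s) or s[i + 2] != s[i])
--         for i in range(len(s) - 1)
--     )
-- ===== Notes on version B (the rewrite author's own statement) =====
-- stated objective: alternative
-- what changed: Instead of A's run-length scan that tracks the minimum run length of at least two and finally compares it with two, B tests each position locally: a run of length exactly two exists iff some index i has s[i]==s[i+1] with a different (or absent) character on both sides; B returns not any(...) over the indices, computing no run lengths at all.
import Mathlib
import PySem

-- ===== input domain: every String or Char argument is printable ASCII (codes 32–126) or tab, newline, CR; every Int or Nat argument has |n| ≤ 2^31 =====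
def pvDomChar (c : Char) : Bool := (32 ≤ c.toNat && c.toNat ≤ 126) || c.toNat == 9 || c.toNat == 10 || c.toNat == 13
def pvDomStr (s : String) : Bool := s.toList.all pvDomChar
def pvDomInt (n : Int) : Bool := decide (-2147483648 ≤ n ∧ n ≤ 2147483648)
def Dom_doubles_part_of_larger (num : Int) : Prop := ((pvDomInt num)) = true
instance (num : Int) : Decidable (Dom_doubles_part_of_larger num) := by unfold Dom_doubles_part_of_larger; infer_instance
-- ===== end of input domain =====

-- B replaces A's run-length scan (min accumulator over run lengths >= 2, finally compared
-- with 2) by a position-wise neighborhood test: a run of length exactly 2 exists iff some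
-- index i has s[i]==s[i+1] with a different (or absent) character on both sides.

-- ===== PORT A =====
-- inner while loop of A: from position loc, advance t_loc while the char equals val;
-- returns (number of FURTHER equal chars, the remaining suffix)
def pvSpanRun (val : Char) : List Char → Nat × List Char
  | [] => (0, [])
  | c :: rest =>
    if c == val then
      let r := pvSpanRun val rest
      (r.1 + 1, r.2)
    else (0, c :: rest)

-- length of the remainder never grows (used for termination of the outer loop)
theorem pvSpanRun_len (val : Char) (l : List Char) : (pvSpanRun val l).2.length ≤ l.length := by
  induction l with
  | nil => simp [pvSpanRun]
  | cons c rest ih =>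
    simp only [pvSpanRun]
    split
    · exact Nat.le_succ_of_le ih
    · simp

-- outer while loop of A; min_length is float('inf') or an int: Option Int, none = inf
def pvGoA : List Char → Option Int → Bool
  | [], m => decide (m ≠ some 2)
  | c :: rest, m =>
    let r := pvSpanRun c rest
    let length : Int := (r.1 : Int) + 1
    let m' := if 2 ≤ length then
        some (match m with | none => length | some v => min length v)
      else m
    pvGoA r.2 m'
termination_by l _ => l.length
decreasing_by exact Nat.lt_succ_of_le (pvSpanRun_len c rest)

def doubles_part_of_larger (num : Int) : Bool :=
  pvGoA (PySem.Int.toStr num).toList none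

-- ===== PORT B =====
-- the generator-expression body at index i; every getD access pvWA makes is in range
-- (i+1 <= len-1; i-1 only behind i≠0; i+2 only behind i+2≠len), so the default is never used
def pvP (s : List Char) (i : Nat) : Bool :=
  s.getD i 'x' == s.getD (i + 1) 'x'
  && (decide (i = 0) || s.getD (i - 1) 'x' != s.getD i 'x')
  && (decide (i + 2 = s.length) || s.getD (i + 2) 'x' != s.getD i 'x')

-- any(... for i in range(len(s) - 1))
def pvWA (s : List Char) : Bool := (List.range (s.length - 1)).any (pvP s)

def doubles_part_of_larger_alt (num : Int) : Bool :=
  !(pvWA (PySem.Int.toStr num).toList)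

-- ===== PRECONDITION & SPEC =====
def Spec_doubles_part_of_larger (num : Int) (out : Bool) : Prop := out = doubles_part_of_larger_alt num
instance (num : Int) (out : Bool) : Decidable (Spec_doubles_part_of_larger num out) := by unfold Spec_doubles_part_of_larger; infer_instance

-- ===== CLAIM (what is proved, stated in full; the proofs are below) =====
def Claim_equal_doubles_part_of_larger : Prop := ∀ (num : Int), Dom_doubles_part_of_larger num → Spec_doubles_part_of_larger num (doubles_part_of_larger num)

-- ===== LEMMAS AND PROOFS =====

-- proof-side notion: list of (key, run length) of the maximal runs, in order
def pvGroupRuns : List Char → List (Char × Nat)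
  | [] => []
  | c :: rest =>
    (c, (rest.takeWhile (· == c)).length + 1) :: pvGroupRuns (rest.dropWhile (· == c))
termination_by l => l.length
decreasing_by exact Nat.lt_succ_of_le (List.length_dropWhile_le _ _)

theorem pvSpanRun_eq (val : Char) (l : List Char) :
    pvSpanRun val l = ((l.takeWhile (· == val)).length, l.dropWhile (· == val)) := by
  induction l with
  | nil => simp [pvSpanRun]
  | cons c rest ih =>
    simp only [pvSpanRun, List.takeWhile, List.dropWhile]
    by_cases h : (c == val) = true
    · simp [h, ih]
    · simp [h]

-- A's loop invariant: the accumulator is none or an int ≥ 2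
theorem pvGoA_eq (l : List Char) (m : Option Int)
    (hm : m = none ∨ ∃ v : Int, 2 ≤ v ∧ m = some v) :
    pvGoA l m = (decide (m ≠ some 2) && !((pvGroupRuns l).any (fun p => p.2 == 2))) := by
  induction l using pvGroupRuns.induct generalizing m with
  | case1 => simp [pvGoA, pvGroupRuns]
  | case2 c rest ih =>
    rw [pvGoA.eq_def]
    simp only [pvSpanRun_eq]
    rw [pvGroupRuns]
    simp only [List.any_cons, Bool.not_or]
    set n := (rest.takeWhile (· == c)).length with hn
    by_cases h2 : 2 ≤ (n : Int) + 1
    · have hn1 : 1 ≤ n := by omega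
      rw [if_pos h2]
      cases hm with
      | inl h =>
        subst h
        rw [ih _ (Or.inr ⟨(n : Int) + 1, h2, rfl⟩)]
        have h1 : decide ((some ((n : Int) + 1) : Option Int) ≠ some 2) = !(n + 1 == 2) := by
          by_cases hx : n + 1 = 2
          · have hi : (n : Int) + 1 = 2 := by omega
            simp [hi]
            omega
          · have hi : (n : Int) + 1 ≠ 2 := by omega
            simp [hi]
            omega
        rw [h1]
        simp
      | inr h =>
        obtain ⟨v, hv2, rfl⟩ := h
        have hmin2 : 2 ≤ min ((n : Int) + 1) v := le_min h2 hv2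
        rw [ih _ (Or.inr ⟨min ((n : Int) + 1) v, hmin2, rfl⟩)]
        have hkey : (min ((n : Int) + 1) v = 2) ↔ (n + 1 = 2 ∨ v = 2) := by
          rw [min_def]
          split <;> constructor <;> intro hx
          · left; omega
          · cases hx <;> omega
          · right; omega
          · cases hx <;> omega
        have h1 : decide ((some (min ((n : Int) + 1) v) : Option Int) ≠ some 2)
            = (decide ((some v : Option Int) ≠ some 2) && !(n + 1 == 2)) := by
          by_cases ha : n + 1 = 2 <;> by_cases hb : v = (2 : Int) <;>
            simp [ha, hb, hkey] <;> try omega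
        rw [h1]
        rw [Bool.and_assoc, Bool.and_comm (!(n + 1 == 2))]
    · have hn0 : n = 0 := by omega
      rw [if_neg h2, ih _ hm]
      have h1 : (!(n + 1 == 2)) = true := by
        simp
        omega
      rw [h1, Bool.true_and]

-- getD on a list that starts with a run of copies of c
theorem pvRunGetD (t : List Char) (r : List Char) (c d : Char) (ht : ∀ x ∈ t, x = c) :
    ∀ i, (c :: (t ++ r)).getD i d
      = if i ≤ t.length then c else r.getD (i - t.length - 1) d := by
  induction t generalizing r with
  | nil =>
    intro i
    cases i with
    | zero => simp
    | succ j => simp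
  | cons a t' ih =>
    intro i
    have hac : a = c := ht a (by simp)
    subst hac
    cases i with
    | zero => simp
    | succ j =>
      simp only [List.cons_append, List.getD_cons_succ, List.length_cons]
      rw [ih r (fun x hx => ht x (by simp [hx])) j]
      by_cases h : j ≤ t'.length
      · rw [if_pos h, if_pos (by omega)]
      · rw [if_neg h, if_neg (by omega)]
        congr 1
        omega

theorem pvLen (c : Char) (t r : List Char) :
    (c :: (t ++ r)).length = t.length + 1 + r.length := by
  simp; omega

-- pvP at index 0 of a run-headed list (0 must be a valid generator index)
theorem pvP_zero (c : Char) (t r : List Char) (ht : ∀ x ∈ t, x = c)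
    (hr : ∀ x ∈ r.head?, x ≠ c) (h0 : 0 < t.length + r.length) :
    pvP (c :: (t ++ r)) 0 = decide (t.length = 1) := by
  unfold pvP
  simp only [Nat.zero_add, Nat.zero_sub]
  have g0 : (c :: (t ++ r)).getD 0 'x' = c := by
    rw [pvRunGetD t r c 'x' ht 0, if_pos (by omega)]
  have gL : (c :: (t ++ r)).length = t.length + 1 + r.length := pvLen c t r
  rw [g0, gL]
  rcases Nat.lt_or_ge t.length 1 with hn | hn
  · -- t = [], r nonempty with head ≠ c
    have hte : t.length = 0 := by omega
    have g1 : (c :: (t ++ r)).getD 1 'x' = r.getD 0 'x' := by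
      rw [pvRunGetD t r c 'x' ht 1, if_neg (by omega)]
      congr 1
      omega
    obtain ⟨x, r', rfl⟩ : ∃ x r', r = x :: r' := by
      cases r with
      | nil =>
        exfalso
        simp only [List.length_nil] at h0
        omega
      | cons x r' => exact ⟨x, r', rfl⟩
    have hx : x ≠ c := hr x (by simp)
    rw [g1]
    simp only [List.getD_cons_zero]
    have hcx : (c == x) = false := by
      simp only [beq_eq_false_iff_ne, ne_eq]
      exact Ne.symm hx
    rw [hcx]
    simp [hte]
  · have g1 : (c :: (t ++ r)).getD 1 'x' = c := by
      rw [pvRunGetD t r c 'x' ht 1, if_pos (by omega)]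
    rw [g1]
    rcases Nat.lt_or_ge t.length 2 with hn2 | hn2
    · -- t.length = 1
      have hte : t.length = 1 := by omega
      have g2 : (c :: (t ++ r)).getD 2 'x' = r.getD 0 'x' := by
        rw [pvRunGetD t r c 'x' ht 2, if_neg (by omega)]
        congr 1
        omega
      rw [g2, hte]
      cases r with
      | nil => simp
      | cons x r' =>
        have hx : x ≠ c := hr x (by simp)
        have hL : (decide (2 = 1 + 1 + (x :: r').length) : Bool) = false := by
          simp only [decide_eq_false_iff_not, List.length_cons]
          omega
        have hxb : ((x :: r').getD 0 'x' != c) = true := by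
          simp only [List.getD_cons_zero, bne_iff_ne, ne_eq]
          exact hx
        rw [hL, hxb]
        simp
    · -- t.length ≥ 2
      have g2 : (c :: (t ++ r)).getD 2 'x' = c := by
        rw [pvRunGetD t r c 'x' ht 2, if_pos (by omega)]
      rw [g2]
      have hL : (decide (2 = t.length + 1 + r.length) : Bool) = false := by
        simp only [decide_eq_false_iff_not]
        omega
      have hne : (decide (t.length = 1) : Bool) = false := by
        simp only [decide_eq_false_iff_not]
        omega
      rw [hL, hne]
      simp

-- pvP inside the first run (not at its start) is false
theorem pvP_mid (c : Char) (t r : List Char) (ht : ∀ x ∈ t, x = c)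
    (i : Nat) (h1 : 1 ≤ i) (h2 : i ≤ t.length) :
    pvP (c :: (t ++ r)) i = false := by
  unfold pvP
  have gi : (c :: (t ++ r)).getD i 'x' = c := by
    rw [pvRunGetD t r c 'x' ht i, if_pos h2]
  have gp : (c :: (t ++ r)).getD (i - 1) 'x' = c := by
    rw [pvRunGetD t r c 'x' ht (i - 1), if_pos (by omega)]
  rw [gi, gp]
  have : (decide (i = 0) : Bool) = false := by
    simp only [decide_eq_false_iff_not]
    omega
  simp [this]

-- pvP past the first run is pvP of the tail list
theorem pvP_shift (c : Char) (t r : List Char) (ht : ∀ x ∈ t, x = c)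
    (hr : ∀ x ∈ r.head?, x ≠ c) (j : Nat) (hj : j + 1 < r.length) :
    pvP (c :: (t ++ r)) (t.length + 1 + j) = pvP r j := by
  unfold pvP
  have g1 : (c :: (t ++ r)).getD (t.length + 1 + j) 'x' = r.getD j 'x' := by
    rw [pvRunGetD t r c 'x' ht, if_neg (by omega)]
    congr 1
    omega
  have g2 : (c :: (t ++ r)).getD (t.length + 1 + j + 1) 'x' = r.getD (j + 1) 'x' := by
    rw [pvRunGetD t r c 'x' ht, if_neg (by omega)]
    congr 1
    omega
  have g3 : (c :: (t ++ r)).getD (t.length + 1 + j + 2) 'x' = r.getD (j + 2) 'x' := by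
    rw [pvRunGetD t r c 'x' ht, if_neg (by omega)]
    congr 1
    omega
  have gL : (c :: (t ++ r)).length = t.length + 1 + r.length := pvLen c t r
  have eL : (decide (t.length + 1 + j + 2 = t.length + 1 + r.length) : Bool)
      = decide (j + 2 = r.length) := decide_eq_decide.mpr (by omega)
  rw [g1, g2, g3, gL, eL]
  have hi0 : (decide (t.length + 1 + j = 0) : Bool) = false := by
    simp only [decide_eq_false_iff_not]
    omega
  rw [hi0]
  cases j with
  | zero =>
    have gp : (c :: (t ++ r)).getD (t.length + 1 + 0 - 1) 'x' = c := by
      rw [pvRunGetD t r c 'x' ht, if_pos (by omega)]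
    rw [gp]
    obtain ⟨x, r', rfl⟩ : ∃ x r', r = x :: r' := by
      cases r with
      | nil => exact absurd hj (by simp)
      | cons x r' => exact ⟨x, r', rfl⟩
    have hx : x ≠ c := hr x (by simp)
    have hcx : (c != (x :: r').getD 0 'x') = true := by
      simp only [List.getD_cons_zero, bne_iff_ne, ne_eq]
      exact Ne.symm hx
    rw [hcx]
    simp
  | succ k =>
    have gp : (c :: (t ++ r)).getD (t.length + 1 + (k + 1) - 1) 'x' = r.getD k 'x' := by
      rw [pvRunGetD t r c 'x' ht, if_neg (by omega)]
      congr 1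
      omega
    rw [gp]
    have hk0 : (decide (k + 1 = 0) : Bool) = false := by
      simp only [decide_eq_false_iff_not]
      omega
    rw [hk0]
    have : k + 1 - 1 = k := rfl
    rw [this]

-- the window check peels off one maximal run
theorem pvWA_cons (c : Char) (t r : List Char) (ht : ∀ x ∈ t, x = c)
    (hr : ∀ x ∈ r.head?, x ≠ c) :
    pvWA (c :: (t ++ r)) = (decide (t.length = 1) || pvWA r) := by
  unfold pvWA
  rw [pvLen]
  rw [Bool.eq_iff_iff]
  simp only [List.any_eq_true, List.mem_range, Bool.or_eq_true, decide_eq_true_eq]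
  constructor
  · rintro ⟨i, hi, hp⟩
    rcases Nat.lt_or_ge i 1 with h0 | h0
    · have : i = 0 := by omega
      subst this
      rw [pvP_zero c t r ht hr (by omega)] at hp
      exact Or.inl (by simpa using hp)
    · rcases Nat.lt_or_ge t.length i with hgt | hle
      swap
      · rw [pvP_mid c t r ht i h0 hle] at hp
        simp at hp
      · have hj : i = t.length + 1 + (i - t.length - 1) := by omega
        set j := i - t.length - 1 with hjdef
        have hjr : j + 1 < r.length := by omega
        rw [hj, pvP_shift c t r ht hr j hjr] at hp
        exact Or.inr ⟨j, by omega, hp⟩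
  · rintro (h1 | ⟨j, hj, hp⟩)
    · refine ⟨0, by omega, ?_⟩
      rw [pvP_zero c t r ht hr (by omega)]
      simp [h1]
    · refine ⟨t.length + 1 + j, by omega, ?_⟩
      rw [pvP_shift c t r ht hr j (by omega)]
      exact hp

theorem pvHeadDropWhile (c : Char) (l : List Char) :
    ∀ x ∈ (l.dropWhile (· == c)).head?, x ≠ c := by
  induction l with
  | nil => simp [List.dropWhile]
  | cons a l' ih =>
    rw [List.dropWhile_cons]
    by_cases h : (a == c) = true
    · simpa [h] using ih
    · intro x hx
      rw [if_neg h] at hx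
      simp only [List.head?_cons, Option.mem_some_iff] at hx
      subst hx
      simpa using h

-- the window check finds exactly the runs of length 2
theorem pvWA_eq_runs (l : List Char) :
    pvWA l = (pvGroupRuns l).any (fun p => p.2 == 2) := by
  induction l using pvGroupRuns.induct with
  | case1 => simp [pvWA, pvGroupRuns]
  | case2 c rest ih =>
    have ht : ∀ x ∈ rest.takeWhile (· == c), x = c := by
      intro x hx
      have := List.mem_takeWhile_imp hx
      simpa using this
    have hsplit : rest = rest.takeWhile (· == c) ++ rest.dropWhile (· == c) :=
      (List.takeWhile_append_dropWhile).symm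
    rw [pvGroupRuns]
    simp only [List.any_cons]
    conv_lhs => rw [hsplit]
    rw [pvWA_cons c _ _ ht (pvHeadDropWhile c rest), ih]
    congr 1
    rw [Bool.eq_iff_iff]
    simp only [decide_eq_true_eq, beq_iff_eq]
    omega

-- ===== VERDICT (by name: the statement is the Claim_ definition above) =====
theorem doubles_part_of_larger_spec : Claim_equal_doubles_part_of_larger := by
  intro num _
  unfold Spec_doubles_part_of_larger doubles_part_of_larger doubles_part_of_larger_alt
  rw [pvGoA_eq _ none (Or.inl rfl), pvWA_eq_runs]
  simp
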